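-- pv_equiv track=rewrite | github.com/chipsalliance/caliptra-mcu-sw | peakrdl-tock/src/peakrdl_tock/utils.py | hex_u32
-- ===== SOURCE A (Python) =====
-- def hex_u32(value: int) -> str:
--     """Format a value as a Rust hex constant with underscore separators.
--
--     Matches the existing generator output style (e.g., 0x2100_0000).
--     """
--     if value == 0:
--         return "0x0"
--     raw = f"{value:x}"
--     # Pad to even number of digits
--     if len(raw) % 2:
--         raw = "0" + raw
--     # Insert underscores from right, every 4 hex digits
--     chunks = []
--     while raw:
--         chunks.append(raw[-4:] if len(raw) >= 4 else raw)
--         raw = raw[: -4 if len(raw) >= 4 else 0]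
--     chunks = [c for c in chunks if c]
--     return "0x" + "_".join(reversed(chunks))
-- ===== SOURCE B (Python) =====
-- def hex_u32(value: int) -> str:
--     """Format a value as a Rust hex constant with underscore separators."""
--     if value == 0:
--         return "0x0"
--     raw = f"{value:x}"
--     if len(raw) % 2:
--         raw = "0" + raw
--     # Forward scan: head piece of len(raw) % 4 digits, then fixed 4-digit slices.
--     head = len(raw) % 4
--     parts = [raw[:head]] if head else []
--     for i in range(head, len(raw), 4):
--         parts.append(raw[i:i + 4])
--     return "0x" + "_".join(parts)
-- ===== Notes on version B (the rewrite author's own statement) =====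
-- stated objective: simpler
-- what changed: A pops four-char chunks off the right of the hex string in a destructive while-loop, then filters and reverses the collected chunks; B computes the split points up front (head = length mod four) and builds the parts in one forward scan over the remaining fixed-width slices, with no mutation of raw, no filter and no reversal.
import Mathlib
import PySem

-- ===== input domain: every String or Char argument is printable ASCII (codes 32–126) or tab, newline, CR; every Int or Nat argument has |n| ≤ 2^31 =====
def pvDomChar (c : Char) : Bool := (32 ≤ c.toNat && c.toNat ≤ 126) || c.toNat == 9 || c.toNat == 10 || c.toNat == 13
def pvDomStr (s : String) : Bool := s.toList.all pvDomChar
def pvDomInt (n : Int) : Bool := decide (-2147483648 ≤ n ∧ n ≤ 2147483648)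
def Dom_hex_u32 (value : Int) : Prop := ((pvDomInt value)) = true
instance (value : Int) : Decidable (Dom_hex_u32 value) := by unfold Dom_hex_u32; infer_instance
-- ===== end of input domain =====

-- B replaces A's destructive right-to-left chunk-popping loop (with a final reversal)
-- by a single forward scan over precomputed split points; objective: simpler, same cost.

-- shared helper: f"{value:x}" — lowercase hex digits, '-' prefix for negatives (exact:
-- CPython formats negatives as '-' followed by the hex of the absolute value)
def pyHexChars (v : Int) : List Char :=
  if v < 0 then '-' :: Nat.toDigits 16 v.natAbs else Nat.toDigits 16 v.toNat

-- ===== PORT A =====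
-- A's while loop: pop raw[-4:] (or all of raw when shorter) off the right, collecting chunks
def hexChunksA (raw : List Char) (chunks : List (List Char)) : List (List Char) :=
  if h : raw = [] then chunks
  else hexChunksA
        (PySem.List.slice raw none (some (if 4 ≤ raw.length then -4 else 0)))
        (chunks ++ [if 4 ≤ raw.length then PySem.List.slice raw (some (-4)) none else raw])
termination_by raw.length
decreasing_by
  split_ifs with h4
  · rw [PySem.List.slice_to_neg_ofNat raw 4 (by omega)]
    simp [List.length_take]
    omega
  · rw [PySem.List.slice_to (xs := raw) (b := 0) (by omega)]
    simp only [Int.toNat_zero, List.take_zero, List.length_nil]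
    exact List.length_pos_of_ne_nil h

def hex_u32 (value : Int) : String :=
  if value = 0 then "0x0"
  else
    let raw := pyHexChars value
    let raw := if raw.length % 2 = 1 then '0' :: raw else raw
    let chunks := hexChunksA raw []
    let chunks := chunks.filter (fun c => c ≠ [])
    String.ofList ('0' :: 'x' :: PySem.Chars.join ['_'] chunks.reverse)

-- ===== PORT B =====
def hex_u32_alt (value : Int) : String :=
  if value = 0 then "0x0"
  else
    let raw := pyHexChars value
    let raw := if raw.length % 2 = 1 then '0' :: raw else raw
    let head : Nat := raw.length % 4
    let parts : List (List Char) :=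
      if head ≠ 0 then [PySem.List.slice raw none (some (head : Int))] else []
    let parts := (PySem.List.pyRange (head : Int) (raw.length : Int) 4).foldl
        (fun ps i => ps ++ [PySem.List.slice raw (some i) (some (i + 4))]) parts
    String.ofList ('0' :: 'x' :: PySem.Chars.join ['_'] parts)

-- ===== PRECONDITION & SPEC =====
def Spec_hex_u32 (value : Int) (out : String) : Prop := out = hex_u32_alt value
instance (value : Int) (out : String) : Decidable (Spec_hex_u32 value out) := by unfold Spec_hex_u32; infer_instance

-- ===== CLAIM (what is proved, stated in full; the proofs are below) =====
def Claim_equal_hex_u32 : Prop := ∀ (value : Int), Dom_hex_u32 value → Spec_hex_u32 value (hex_u32 value)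

-- ===== LEMMAS AND PROOFS =====

-- proof-side common form: the 4-char chunks of l, peeled from the right, in left-to-right order
def chunkR (l : List Char) : List (List Char) :=
  if l.length = 0 then []
  else if 4 ≤ l.length then chunkR (l.take (l.length - 4)) ++ [l.drop (l.length - 4)]
  else [l]
termination_by l.length
decreasing_by simp [List.length_take]; omega

lemma chunkR_ne_nil (l : List Char) : ∀ c ∈ chunkR l, c ≠ [] := by
  induction l using chunkR.induct with
  | case1 l h0 => intro c hc; rw [chunkR] at hc; simp [h0] at hc
  | case2 l h0 h4 ih =>
      intro c hc
      rw [chunkR] at hc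
      simp only [h0, if_false, h4, if_true] at hc
      rcases List.mem_append.mp hc with h | h
      · exact ih c h
      · simp only [List.mem_singleton] at h
        subst h
        intro hnil
        have := congrArg List.length hnil
        simp [List.length_drop] at this
        omega
  | case3 l h0 h4 =>
      intro c hc
      rw [chunkR] at hc
      simp only [h0, if_false, h4, if_false, List.mem_singleton] at hc
      subst hc
      exact fun hnil => h0 (by simp [hnil])

lemma hexChunksA_eq (l : List Char) : ∀ acc, hexChunksA l acc = acc ++ (chunkR l).reverse := by
  induction l using chunkR.induct with
  | case1 l h0 =>
      intro acc
      have hl : l = [] := List.eq_nil_of_length_eq_zero h0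
      rw [hexChunksA, chunkR]
      simp [hl]
  | case2 l h0 h4 ih =>
      intro acc
      have hne : l ≠ [] := fun h => h0 (by simp [h])
      rw [hexChunksA, chunkR]
      simp only [hne, dif_neg, not_false_iff, h0, if_false, h4, if_true]
      rw [PySem.List.slice_to_neg_ofNat l 4 (by omega),
          PySem.List.slice_from_neg_ofNat l 4 (by omega)]
      rw [ih]
      simp
  | case3 l h0 h4 =>
      intro acc
      have hne : l ≠ [] := fun h => h0 (by simp [h])
      rw [hexChunksA, chunkR]
      simp only [hne, dif_neg, not_false_iff, h0, if_false, h4, if_false]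
      rw [PySem.List.slice_to (xs := l) (b := 0) (by omega)]
      rw [hexChunksA]
      simp

-- B's forward scan, in Nat form, equals chunkR
lemma partsB_eq (l : List Char) :
    (if l.length % 4 ≠ 0 then [l.take (l.length % 4)] else [])
      ++ (List.range ((l.length - l.length % 4) / 4)).map
          (fun k => (l.drop (l.length % 4 + 4 * k)).take 4)
    = chunkR l := by
  induction l using chunkR.induct with
  | case1 l h0 => rw [chunkR]; simp [h0]
  | case2 l h0 h4 ih =>
      rw [chunkR]
      simp only [h0, if_false, h4, if_true]
      set L := l.length with hL
      set h := L % 4 with hh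
      have hhle : h ≤ L - 4 := by omega
      have hN : (L - h) / 4 = (L - 4 - h) / 4 + 1 := by omega
      have hlen' : (l.take (L - 4)).length = L - 4 := by simp [List.length_take]; omega
      have hmod' : (l.take (L - 4)).length % 4 = h := by rw [hlen']; omega
      rw [hN, List.range_succ, List.map_append]
      simp only [List.map_cons, List.map_nil]
      have hlast : (l.drop (h + 4 * ((L - 4 - h) / 4))).take 4 = l.drop (L - 4) := by
        have : h + 4 * ((L - 4 - h) / 4) = L - 4 := by omega
        rw [this]
        exact List.take_of_length_le (by simp [List.length_drop]; omega)
      rw [hlast]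
      rw [← ih, hlen']
      have hmod2 : (L - 4) % 4 = h := by omega
      rw [hmod2, List.append_assoc]
      have hhead : List.take h (List.take (L - 4) l) = List.take h l := by
        rw [List.take_take, Nat.min_eq_left hhle]
      have hmap :
          List.map (fun k => List.take 4 (List.drop (h + 4 * k) (List.take (L - 4) l)))
              (List.range ((L - 4 - h) / 4))
            = List.map (fun k => List.take 4 (List.drop (h + 4 * k) l))
              (List.range ((L - 4 - h) / 4)) := by
        apply List.map_congr_left
        intro k hk
        simp only [List.mem_range] at hk
        rw [List.drop_take, List.take_take]
        congr 1
        omega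
      rw [hhead, hmap]
  | case3 l h0 h4 =>
      rw [chunkR]
      simp only [h0, if_false, h4, if_false]
      have hm : l.length % 4 = l.length := by omega
      rw [hm]
      have : (l.length - l.length) / 4 = 0 := by omega
      rw [this]
      simp [List.take_of_length_le (Nat.le_refl _), h0]

-- bridge: B's port expression (pyRange + slices) is the Nat-form forward scan
lemma partsB_port (l : List Char) :
    (PySem.List.pyRange ((l.length % 4 : Nat) : Int) ((l.length : Nat) : Int) 4).foldl
        (fun ps i => ps ++ [PySem.List.slice l (some i) (some (i + 4))])
        (if (l.length % 4 : Nat) ≠ 0 then [PySem.List.slice l none (some ((l.length % 4 : Nat) : Int))] else [])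
    = (if l.length % 4 ≠ 0 then [l.take (l.length % 4)] else [])
      ++ (List.range ((l.length - l.length % 4) / 4)).map
          (fun k => (l.drop (l.length % 4 + 4 * k)).take 4) := by
  set L := l.length with hL
  set h := L % 4 with hh
  rw [PySem.List.foldl_append_singleton_eq_map]
  congr 1
  · split_ifs with hz
    · rw [PySem.List.slice_to_natCast]
    · rfl
  · rw [PySem.List.pyRange_of_pos (h : Int) (L : Int) (by omega), List.map_map]
    have hcnt : (if (h : Int) < (L : Int) then (((L : Int) - (h : Int) + 4 - 1) / 4).toNat else 0)
        = (L - h) / 4 := by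
      split_ifs with hlt
      · have h4 : (4:Int) ∣ ((L : Int) - (h : Int)) := by omega
        omega
      · omega
    rw [hcnt]
    apply List.map_congr_left
    intro k hk
    simp only [Function.comp_apply]
    have h1 : (0:Int) ≤ (h : Int) + 4 * (k : Int) := by positivity
    rw [PySem.List.slice_toNat l h1 (by omega)]
    congr 1 ; omega

-- the chunk lists of the two ports coincide
lemma chunks_eq (raw : List Char) :
    ((hexChunksA raw []).filter (fun c => c ≠ [])).reverse
    = (PySem.List.pyRange ((raw.length % 4 : Nat) : Int) ((raw.length : Nat) : Int) 4).foldl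
        (fun ps i => ps ++ [PySem.List.slice raw (some i) (some (i + 4))])
        (if (raw.length % 4 : Nat) ≠ 0 then [PySem.List.slice raw none (some ((raw.length % 4 : Nat) : Int))] else []) := by
  rw [partsB_port, partsB_eq, hexChunksA_eq]
  simp only [List.nil_append, List.filter_reverse, List.reverse_reverse]
  rw [List.filter_eq_self.mpr]
  intro c hc
  simpa using chunkR_ne_nil raw c hc

-- ===== VERDICT (by name: the statement is the Claim_ definition above) =====
theorem hex_u32_spec : Claim_equal_hex_u32 := by
  intro value _
  unfold Spec_hex_u32 hex_u32 hex_u32_alt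
  split_ifs with hz
  · rfl
  · dsimp only
    rw [chunks_eq]
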